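-- pv_equiv track=rewrite | github.com/bonshot/TDA_practicando | practica_por_temas/ejercicios_PD.py | max_ganancia
-- ===== SOURCE A (Python) =====
-- def max_ganancia(eventos):
--     dias = len(eventos)
--     rubros = len(eventos[0])
--
--     # Inicializar una matriz para almacenar las ganancias máximas
--     dp = [[0] * rubros for _ in range(dias)]
--
--     # Llenar la matriz bottom-up
--     for dia in range(dias):
--         for rubro in range(rubros):
--             ganancia_actual = eventos[dia][rubro]
--
--             # Calcula la ganancia máxima considerando las restricciones
--             if dia > 0:
--                 ganancia_anterior = max(dp[dia - 1][r] for r in range(rubros) if r != rubro)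
--                 dp[dia][rubro] = ganancia_actual + ganancia_anterior
--             else:
--                 dp[dia][rubro] = ganancia_actual
--
--     # La ganancia máxima estará en la última fila de la matriz
--     return max(dp[dias - 1])
-- ===== SOURCE B (Python) =====
-- def max_ganancia(eventos):
--     rubros = len(eventos[0])
--     prev = list(eventos[0])
--     for fila in eventos[1:]:
--         m1 = max(prev)                 # best of previous day
--         resto = list(prev)
--         resto.remove(m1)
--         m2 = max(resto)                # second best (with multiplicity)
--         prev = [fila[j] + (m2 if prev[j] == m1 else m1) for j in range(rubros)]
--     return max(prev)
-- ===== Notes on version B (the rewrite author's own statement) =====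
-- stated objective: faster
-- what changed: Instead of rescanning the whole previous dp row for every rubro to get the max over the other rubros, B keeps only the previous day's row and its top-two maxima, so the excluded max is read off in O(1); the dp matrix disappears.
import Mathlib
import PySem

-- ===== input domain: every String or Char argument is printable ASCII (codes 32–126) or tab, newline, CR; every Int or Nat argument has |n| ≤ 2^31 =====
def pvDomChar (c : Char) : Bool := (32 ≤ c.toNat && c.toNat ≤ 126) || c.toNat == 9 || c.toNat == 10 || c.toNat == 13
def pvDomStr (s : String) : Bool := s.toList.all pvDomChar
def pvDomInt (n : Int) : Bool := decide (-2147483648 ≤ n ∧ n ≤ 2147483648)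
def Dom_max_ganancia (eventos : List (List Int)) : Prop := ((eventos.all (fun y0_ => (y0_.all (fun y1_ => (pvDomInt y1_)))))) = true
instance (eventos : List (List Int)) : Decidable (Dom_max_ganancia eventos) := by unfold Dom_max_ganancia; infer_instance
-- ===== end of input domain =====

-- B replaces A's O(rubros) rescan of the previous dp row per rubro by the row's
-- top-two maxima, computed once per day: asymptotically faster (O(dias*rubros)).

-- Python's max over a nonempty list/generator (the [] case is unreachable under Pre_).
def pyMax (xs : List Int) : Int :=
  match xs with
  | [] => 0
  | h :: t => t.foldl max h

-- ===== PORT A =====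
-- max(dp[dia-1][r] for r in range(rubros) if r != rubro)
def aExcl (prev : List Int) (rubros rubro : Int) : Int :=
  pyMax (((PySem.List.pyRange 0 rubros 1).filter (fun r => r ≠ rubro)).map
    (fun r => PySem.List.pyGetD prev r 0))

-- the value assigned to dp[dia][rubro]
def aEntry (eventos : List (List Int)) (dp : List (List Int)) (rubros dia rubro : Int) : Int :=
  let ganancia_actual := PySem.List.pyGetD (PySem.List.pyGetD eventos dia []) rubro 0
  if dia > 0 then ganancia_actual + aExcl (PySem.List.pyGetD dp (dia - 1) []) rubros rubro
  else ganancia_actual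

def max_ganancia (eventos : List (List Int)) : Int :=
  let dias : Int := eventos.length
  let rubros : Int := (eventos.headD []).length
  -- dp = [[0] * rubros for _ in range(dias)]
  let dp0 : List (List Int) := List.replicate dias.toNat (List.replicate rubros.toNat 0)
  -- the two nested for-loops, writing dp[dia][rubro] in order
  let dp := (PySem.List.pyRange 0 dias 1).foldl (fun dp dia =>
      PySem.List.pySetD dp dia
        ((PySem.List.pyRange 0 rubros 1).foldl
          (fun row rubro => PySem.List.pySetD row rubro (aEntry eventos dp rubros dia rubro))
          (PySem.List.pyGetD dp dia []))) dp0
  pyMax (PySem.List.pyGetD dp (dias - 1) [])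

-- ===== PORT B =====
-- one day of B: top-two of prev, then the new row by comprehension
def bStep (rubros : Int) (prev fila : List Int) : List Int :=
  let m1 := pyMax prev
  let resto := (PySem.List.remove? prev m1).getD prev
  let m2 := pyMax resto
  (PySem.List.pyRange 0 rubros 1).map
    (fun j => PySem.List.pyGetD fila j 0 +
      (if PySem.List.pyGetD prev j 0 = m1 then m2 else m1))

def max_ganancia_alt (eventos : List (List Int)) : Int :=
  let rubros : Int := (eventos.headD []).length
  let prev := eventos.headD []
  pyMax (eventos.tail.foldl (bStep rubros) prev)

-- ===== PRECONDITION & SPEC =====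
-- Pre_ = exactly the inputs on which the Python A returns: a nonempty, nonragged-enough
-- matrix (every row at least as long as row 0), row 0 nonempty (else max([]) raises),
-- and at least two rubros when there is more than one day (else the inner max is over
-- an empty generator and raises ValueError).
def Pre_max_ganancia (eventos : List (List Int)) : Prop :=
  eventos ≠ [] ∧ 1 ≤ (eventos.headD []).length ∧
  (∀ row ∈ eventos, (eventos.headD []).length ≤ row.length) ∧
  (1 < eventos.length → 2 ≤ (eventos.headD []).length)
instance (eventos : List (List Int)) : Decidable (Pre_max_ganancia eventos) := by
  unfold Pre_max_ganancia; infer_instance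

def pvWitness_max_ganancia : List (List Int) := [[3, -1], [2, 5], [4, 0]]

def Spec_max_ganancia (eventos : List (List Int)) (out : Int) : Prop := out = max_ganancia_alt eventos
instance (eventos : List (List Int)) (out : Int) : Decidable (Spec_max_ganancia eventos out) := by unfold Spec_max_ganancia; infer_instance

-- ===== CLAIM (what is proved, stated in full; the proofs are below) =====
def Claim_equal_max_ganancia : Prop := ∀ (eventos : List (List Int)), Dom_max_ganancia eventos → Pre_max_ganancia eventos → Spec_max_ganancia eventos (max_ganancia eventos)

-- ===== LEMMAS AND PROOFS =====

theorem max_ganancia_witness_ok :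
    Dom_max_ganancia pvWitness_max_ganancia ∧ Pre_max_ganancia pvWitness_max_ganancia := by
  decide


-- the mathematical day step: new row j = fila[j] + max of prev without index j
def stepM (n : Nat) (prev fila : List Int) : List Int :=
  (List.range n).map (fun j => fila.getD j 0 + pyMax (prev.eraseIdx j))

-- the dp row after day k (row 0 = first)
def rowsB (n : Nat) (first : List Int) (rest : List (List Int)) (k : Nat) : List Int :=
  (rest.take k).foldl (stepM n) first

theorem init_le_foldl_max : ∀ (t : List Int) (a : Int), a ≤ t.foldl max a := by
  intro t
  induction t with
  | nil => simp
  | cons b t ih => intro a; exact (le_max_left a b).trans (ih (max a b))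

theorem foldl_max_le {t : List Int} {a x : Int} (h : x = a ∨ x ∈ t) : x ≤ t.foldl max a := by
  induction t generalizing a with
  | nil => simp at h; simp [h]
  | cons b t ih =>
    simp only [List.foldl_cons, List.mem_cons] at *
    rcases h with h | h | h
    · exact h.le.trans ((le_max_left a b).trans (init_le_foldl_max t (max a b)))
    · exact h.le.trans ((le_max_right a b).trans (init_le_foldl_max t (max a b)))
    · exact ih (Or.inr h)

theorem foldl_max_mem {t : List Int} {a : Int} : t.foldl max a = a ∨ t.foldl max a ∈ t := by
  induction t generalizing a with
  | nil => simp
  | cons b t ih =>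
    simp only [List.foldl_cons, List.mem_cons]
    rcases @ih (max a b) with h | h
    · rw [h]; rcases max_choice a b with hm | hm <;> simp [hm]
    · simp [h]

theorem le_pyMax {xs : List Int} {x : Int} (h : x ∈ xs) : x ≤ pyMax xs := by
  cases xs with
  | nil => simp at h
  | cons a t => simp only [List.mem_cons] at h; exact foldl_max_le h

theorem pyMax_mem {xs : List Int} (h : xs ≠ []) : pyMax xs ∈ xs := by
  cases xs with
  | nil => exact absurd rfl h
  | cons a t =>
    rcases @foldl_max_mem t a with h' | h'
    · simp [pyMax, h']
    · simp [pyMax, h']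

theorem pyMax_eq_of {xs : List Int} {a : Int} (ha : a ∈ xs) (hb : ∀ x ∈ xs, x ≤ a) :
    pyMax xs = a :=
  le_antisymm (hb _ (pyMax_mem (List.ne_nil_of_mem ha))) (le_pyMax ha)

theorem pyMax_perm {xs ys : List Int} (h : xs.Perm ys) (hne : xs ≠ []) : pyMax xs = pyMax ys := by
  have hne' : ys ≠ [] := fun hy => hne (by subst hy; exact h.eq_nil)
  exact le_antisymm (le_pyMax (h.mem_iff.mp (pyMax_mem hne)))
    (le_pyMax (h.mem_iff.mpr (pyMax_mem hne')))

theorem map_getD_range (xs : List Int) :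
    (List.range xs.length).map (fun i => xs.getD i 0) = xs := by
  apply List.ext_getElem
  · simp
  · intro i h1 h2
    simp only [List.getElem_map, List.getElem_range]
    rw [List.getD_eq_getElem xs 0 (by simpa using h2)]

theorem filter_range_map_eq_eraseIdx :
    ∀ (prev : List Int) (j : Nat), j < prev.length →
      ((List.range prev.length).filter (fun r => r ≠ j)).map (fun r => prev.getD r 0)
        = prev.eraseIdx j := by
  intro prev
  induction prev with
  | nil => intro j hj; simp at hj
  | cons h t ih =>
    intro j hj
    cases j with
    | zero =>
      have hmr := map_getD_range t
      simp only [List.getD_eq_getElem?_getD] at hmr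
      simp [List.range_succ_eq_map, List.filter_map, Function.comp_def, List.map_map, hmr]
    | succ jj =>
      have hjj : jj < t.length := by simpa using hj
      have hih := ih jj hjj
      simp only [List.getD_eq_getElem?_getD, ne_eq, decide_not] at hih ⊢
      simp [List.range_succ_eq_map, List.filter_map, Function.comp_def, List.map_map, hih]

theorem pyMax_eraseIdx (prev : List Int) (j : Nat) (h2 : 2 ≤ prev.length)
    (hj : j < prev.length) :
    pyMax (prev.eraseIdx j) =
      if prev.getD j 0 = pyMax prev then pyMax (prev.erase (pyMax prev)) else pyMax prev := by
  have hne : prev ≠ [] := by intro h; simp [h] at h2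
  have hm1 : pyMax prev ∈ prev := pyMax_mem hne
  have hlen : (prev.eraseIdx j).length = prev.length - 1 := List.length_eraseIdx_of_lt hj
  have hene : prev.eraseIdx j ≠ [] := by
    intro h; rw [h] at hlen; simp at hlen; omega
  have hperm : (prev[j] :: prev.eraseIdx j).Perm prev := List.getElem_cons_eraseIdx_perm hj
  rw [List.getD_eq_getElem prev 0 hj]
  by_cases hc : prev[j] = pyMax prev
  · rw [if_pos hc]
    have h1 : (pyMax prev :: prev.eraseIdx j).Perm (pyMax prev :: prev.erase (pyMax prev)) :=
      (hc ▸ hperm).trans (List.perm_cons_erase hm1)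
    exact pyMax_perm h1.cons_inv hene
  · rw [if_neg hc]
    apply pyMax_eq_of
    · rcases List.mem_cons.mp ((hperm.mem_iff).mpr hm1) with h | h
      · exact absurd h.symm hc
      · exact h
    · intro x hx
      exact le_pyMax (List.mem_of_mem_eraseIdx hx)

theorem aExcl_eq (prev : List Int) (n j : Nat) (hlen : prev.length = n) (hj : j < n) :
    aExcl prev (n : Int) (j : Int) = pyMax (prev.eraseIdx j) := by
  subst hlen
  simp only [aExcl, PySem.List.pyRange_one, Int.sub_zero, Int.toNat_natCast,
    List.filter_map, List.map_map, Function.comp_def, zero_add, ne_eq, decide_not,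
    Int.natCast_inj, PySem.List.pyGetD_natCast]
  have hfe := filter_range_map_eq_eraseIdx prev j hj
  simp only [ne_eq, decide_not] at hfe
  rw [hfe]

theorem foldl_set_range (f : Nat → Int) :
    ∀ (m : Nat) (row : List Int), m ≤ row.length →
      (List.range m).foldl (fun r i => r.set i (f i)) row
        = (List.range m).map f ++ row.drop m := by
  intro m
  induction m with
  | zero => simp
  | succ m ih =>
    intro row hm
    have hm' : m ≤ row.length := by omega
    rw [List.range_succ, List.foldl_append, List.map_append, ih row hm']
    simp only [List.foldl_cons, List.foldl_nil]
    rw [List.set_append, if_neg (by simp)]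
    have hdrop : row.drop m = row[m] :: row.drop (m + 1) :=
      List.drop_eq_getElem_cons (by omega)
    rw [hdrop, List.length_map, List.length_range, Nat.sub_self, List.set_cons_zero]
    simp

theorem bStep_eq_stepM (n : Nat) (prev fila : List Int) (hlen : prev.length = n)
    (h2 : 2 ≤ n) : bStep (n : Int) prev fila = stepM n prev fila := by
  subst hlen
  have hne : prev ≠ [] := by intro h; rw [h] at h2; simp at h2
  simp only [bStep, stepM,
    PySem.List.remove?_eq_some_erase prev (pyMax prev) (pyMax_mem hne), Option.getD_some,
    PySem.List.pyRange_one, Int.sub_zero, Int.toNat_natCast, List.map_map,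
    Function.comp_def, zero_add, PySem.List.pyGetD_natCast]
  apply List.map_congr_left
  intro j hjm
  rw [pyMax_eraseIdx prev j h2 (List.mem_range.mp hjm)]

theorem stepM_length (n : Nat) (prev fila : List Int) : (stepM n prev fila).length = n := by
  simp [stepM]

theorem foldl_stepM_length (n : Nat) :
    ∀ (l : List (List Int)) (prev : List Int), prev.length = n →
      (l.foldl (stepM n) prev).length = n := by
  intro l
  induction l with
  | nil => intro prev h; simpa
  | cons x l ih => intro prev h; exact ih _ (stepM_length n prev x)

theorem rowsB_length (n : Nat) (first : List Int) (rest : List (List Int))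
    (hf : first.length = n) (k : Nat) : (rowsB n first rest k).length = n :=
  foldl_stepM_length n _ _ hf

theorem rowsB_succ (n : Nat) (first : List Int) (rest : List (List Int)) (m : Nat)
    (hm : m < rest.length) :
    rowsB n first rest (m + 1) = stepM n (rowsB n first rest m) rest[m] := by
  have ht : rest.take (m + 1) = rest.take m ++ [rest[m]] := by
    rw [List.take_add_one, List.getElem?_eq_getElem hm]; rfl
  unfold rowsB
  rw [ht, List.foldl_append, List.foldl_cons, List.foldl_nil]

theorem foldB (n : Nat) (h2 : 2 ≤ n) :
    ∀ (rest : List (List Int)) (prev : List Int), prev.length = n →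
      rest.foldl (bStep (n : Int)) prev = rest.foldl (stepM n) prev := by
  intro rest
  induction rest with
  | nil => intro prev _; rfl
  | cons fila rest ih =>
    intro prev hlen
    simp only [List.foldl_cons]
    rw [bStep_eq_stepM n prev fila hlen h2]
    exact ih _ (stepM_length n prev fila)

-- the closed form of A's dp after the first k iterations of the outer loop
theorem dp_invariant (first : List Int) (rest : List (List Int)) :
    ∀ k, k ≤ rest.length + 1 →
      (PySem.List.pyRange 0 (k : Int) 1).foldl (fun dp dia =>
          PySem.List.pySetD dp dia
            ((PySem.List.pyRange 0 (first.length : Int) 1).foldl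
              (fun row rubro =>
                PySem.List.pySetD row rubro
                  (aEntry (first :: rest) dp (first.length : Int) dia rubro))
              (PySem.List.pyGetD dp dia [])))
        (List.replicate (rest.length + 1) (List.replicate first.length 0))
      = (List.range k).map (rowsB first.length first rest)
          ++ List.replicate (rest.length + 1 - k) (List.replicate first.length 0) := by
  intro k
  induction k with
  | zero =>
    intro _
    simp [PySem.List.pyRange_one]
  | succ k ih =>
    intro hk1
    have hkd : k < rest.length + 1 := by omega
    have hcast : ((k + 1 : Nat) : Int) = (k : Int) + 1 := by push_cast; ring
    rw [hcast, PySem.List.pyRange_one_succ_right (by positivity), List.foldl_append,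
      ih (by omega)]
    simp only [List.foldl_cons, List.foldl_nil]
    have hRk : ((List.range k).map (rowsB first.length first rest)).length = k := by simp
    have hget : PySem.List.pyGetD
        ((List.range k).map (rowsB first.length first rest)
          ++ List.replicate (rest.length + 1 - k) (List.replicate first.length 0)) (k : Int) []
        = List.replicate first.length 0 := by
      rw [PySem.List.pyGetD_natCast, List.getD_eq_getElem?_getD,
        List.getElem?_append_right (by omega), hRk, Nat.sub_self,
        List.getElem?_replicate]
      simp [show 0 < rest.length + 1 - k by omega]
    rw [hget]
    have hinner : (PySem.List.pyRange 0 (first.length : Int) 1).foldl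
        (fun row rubro =>
          PySem.List.pySetD row rubro
            (aEntry (first :: rest)
              ((List.range k).map (rowsB first.length first rest)
                ++ List.replicate (rest.length + 1 - k) (List.replicate first.length 0))
              (first.length : Int) (k : Int) rubro))
        (List.replicate first.length 0)
        = (List.range first.length).map (fun (j : Nat) =>
            aEntry (first :: rest)
              ((List.range k).map (rowsB first.length first rest)
                ++ List.replicate (rest.length + 1 - k) (List.replicate first.length 0))
              (first.length : Int) (k : Int) ((j : Nat) : Int)) := by
      rw [PySem.List.pyRange_one, Int.sub_zero, Int.toNat_natCast, List.foldl_map]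
      simp only [zero_add, PySem.List.pySetD_natCast]
      rw [foldl_set_range _ first.length (List.replicate first.length 0) (by simp)]
      simp
    rw [hinner]
    have hrow : (List.range first.length).map (fun (j : Nat) =>
        aEntry (first :: rest)
          ((List.range k).map (rowsB first.length first rest)
            ++ List.replicate (rest.length + 1 - k) (List.replicate first.length 0))
          (first.length : Int) (k : Int) ((j : Nat) : Int))
        = rowsB first.length first rest k := by
      cases k with
      | zero =>
        have h0 : PySem.List.pyGetD (first :: rest : List (List Int)) 0 [] = first :=
          PySem.List.pyGetD_zero_cons first rest []
        have hr0 : rowsB first.length first rest 0 = first := rfl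
        simp only [aEntry, Nat.cast_zero, lt_irrefl, h0,
          PySem.List.pyGetD_natCast, hr0]
        exact map_getD_range first
      | succ m =>
        have hm : m < rest.length := by omega
        have hcast2 : ((m + 1 : Nat) : Int) - 1 = (m : Int) := by push_cast; ring
        have hprev : PySem.List.pyGetD
            ((List.range (m + 1)).map (rowsB first.length first rest)
              ++ List.replicate (rest.length + 1 - (m + 1)) (List.replicate first.length 0))
            ((m : Int)) [] = rowsB first.length first rest m := by
          rw [PySem.List.pyGetD_natCast, List.getD_eq_getElem?_getD,
            List.getElem?_append_left (by simp), List.getElem?_map,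
            List.getElem?_range (by omega)]
          rfl
        have hfila : PySem.List.pyGetD (first :: rest : List (List Int)) ((m + 1 : Nat) : Int) []
            = rest[m] := by
          have : ((m + 1 : Nat) : Int) = ((m + 1 : Nat) : Int) := rfl
          rw [PySem.List.pyGetD_natCast]
          simp [List.getD_eq_getElem?_getD, List.getElem?_eq_getElem hm]
        rw [rowsB_succ first.length first rest m hm]
        apply List.map_congr_left
        intro j hjm
        have hj : j < first.length := List.mem_range.mp hjm
        simp only [aEntry]
        rw [if_pos (by positivity), hcast2, hprev, hfila,
          aExcl_eq _ first.length j (rowsB_length first.length first rest rfl m) hj]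
        simp
    rw [hrow]
    rw [PySem.List.pySetD_natCast, List.set_append, if_neg (by rw [hRk]; omega), hRk,
      Nat.sub_self]
    have hrep : List.replicate (rest.length + 1 - k) (List.replicate first.length (0 : Int))
        = List.replicate first.length (0 : Int)
          :: List.replicate (rest.length - k) (List.replicate first.length (0 : Int)) := by
      rw [show rest.length + 1 - k = (rest.length - k) + 1 by omega, List.replicate_succ]
    rw [hrep, List.set_cons_zero, List.range_succ, List.map_append]
    simp [show rest.length + 1 - (k + 1) = rest.length - k by omega]

-- ===== VERDICT (by name: the statement is the Claim_ definition above) =====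
theorem max_ganancia_spec : Claim_equal_max_ganancia := by
  intro eventos _hdom hpre
  obtain ⟨hne, h1, _hrows, h2⟩ := hpre
  cases eventos with
  | nil => exact absurd rfl hne
  | cons first rest =>
    simp only [List.headD_cons, List.length_cons] at h1 h2
    have hdp := dp_invariant first rest (rest.length + 1) le_rfl
    rw [Nat.sub_self, List.replicate_zero, List.append_nil] at hdp
    simp only [Spec_max_ganancia, max_ganancia, max_ganancia_alt, List.headD_cons,
      List.tail_cons, List.length_cons]
    have hc3 : (first.length : Int).toNat = first.length := Int.toNat_natCast _
    rw [Int.toNat_natCast, hc3, hdp]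
    have hlast : PySem.List.pyGetD
        ((List.range (rest.length + 1)).map (rowsB first.length first rest))
        (((rest.length + 1 : Nat) : Int) - 1) [] = rowsB first.length first rest rest.length := by
      rw [show ((rest.length + 1 : Nat) : Int) - 1 = ((rest.length : Nat) : Int) by push_cast; ring,
        PySem.List.pyGetD_natCast, List.getD_eq_getElem?_getD, List.getElem?_map,
        List.getElem?_range (by omega)]
      rfl
    rw [hlast]
    cases rest with
    | nil => rfl
    | cons f2 r2 =>
      have h2' : 2 ≤ first.length := h2 (by simp)
      rw [foldB first.length h2' (f2 :: r2) first rfl]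
      unfold rowsB
      rw [show (f2 :: r2 : List (List Int)).length = (f2 :: r2 : List (List Int)).length from rfl,
        List.take_length]
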